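-- pv_equiv track=rewrite | github.com/NguyenThHien/python | PY02061 - TÍNH TÍCH CHẬP MA TRẬN.py | apply_convolution
-- ===== SOURCE A (Python) =====
-- def apply_convolution(image, kernel, N, M):
--     kernel_size = 3
--     k = kernel_size // 2
--     result_sum = 0
--
--     # Initialize the result matrix
--     result_matrix = [[0] * M for _ in range(N)]
--
--     # Apply convolution
--     for i in range(k, N - k):
--         for j in range(k, M - k):
--             convolution_sum = 0
--             for u in range(-k, k + 1):
--                 for v in range(-k, k + 1):
--                     convolution_sum += image[i + u][j + v] * kernel[u + k][v + k]
--             result_matrix[i][j] = convolution_sum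
--             result_sum += convolution_sum
--
--     return result_sum
-- ===== SOURCE B (Python) =====
-- def apply_convolution(image, kernel, N, M):
--     # Weight-first reorganization: for each of the 9 kernel weights, sum the
--     # correspondingly shifted image window once, then combine.
--     k = 1
--     if N < 3 or M < 3:
--         return 0
--     total = 0
--     for u in range(-k, k + 1):
--         for v in range(-k, k + 1):
--             s = 0
--             for i in range(k + u, N - k + u):
--                 row = image[i]
--                 for j in range(k + v, M - k + v):
--                     s += row[j]
--             total += kernel[u + k][v + k] * s
--     return total
-- ===== Notes on version B (the rewrite author's own statement) =====
-- stated objective: alternative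
-- what changed: Drops the unused result matrix and swaps the loop nesting: B iterates over the 9 kernel offsets and for each sums the shifted image window once, doing 9 multiplications total instead of 9 per output pixel.
import Mathlib
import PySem

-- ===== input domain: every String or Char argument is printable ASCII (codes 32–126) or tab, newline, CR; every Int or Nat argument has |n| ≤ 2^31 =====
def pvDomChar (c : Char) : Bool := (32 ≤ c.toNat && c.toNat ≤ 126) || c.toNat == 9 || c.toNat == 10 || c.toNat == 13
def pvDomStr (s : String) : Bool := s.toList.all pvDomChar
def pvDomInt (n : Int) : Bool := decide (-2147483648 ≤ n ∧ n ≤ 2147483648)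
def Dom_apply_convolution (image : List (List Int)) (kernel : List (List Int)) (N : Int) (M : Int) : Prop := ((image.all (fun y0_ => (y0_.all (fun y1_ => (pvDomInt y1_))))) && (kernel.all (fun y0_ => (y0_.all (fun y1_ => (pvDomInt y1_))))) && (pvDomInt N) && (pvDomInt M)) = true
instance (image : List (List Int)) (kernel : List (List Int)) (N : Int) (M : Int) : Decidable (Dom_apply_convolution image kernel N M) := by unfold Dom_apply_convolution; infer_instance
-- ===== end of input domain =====

-- B drops A's unused result matrix and swaps the loop nesting (kernel offsets outermost); return values agree; Pre_ excludes only inputs where both Pythons raise IndexError.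


-- xs[i] on an inner list; total stand-in for Python indexing — Pre_ keeps every access in range
def pyAt (m : List (List Int)) (i : Int) : List Int := PySem.List.pyGetD m i []
def pyAt2 (m : List (List Int)) (i j : Int) : Int := PySem.List.pyGetD (pyAt m i) j 0

-- ===== PORT A =====
def apply_convolution (image : List (List Int)) (kernel : List (List Int)) (N : Int) (M : Int) : Int :=
  let kernel_size : Int := 3
  let k : Int := PySem.Int.floordiv kernel_size 2
  let result_matrix : List (List Int) :=
    (PySem.List.pyRange 0 N 1).map (fun _ => List.replicate M.toNat 0)
  let st :=
    (PySem.List.pyRange k (N - k) 1).foldl (fun st i =>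
      (PySem.List.pyRange k (M - k) 1).foldl (fun st j =>
        let convolution_sum :=
          (PySem.List.pyRange (-k) (k + 1) 1).foldl (fun c u =>
            (PySem.List.pyRange (-k) (k + 1) 1).foldl (fun c v =>
              c + pyAt2 image (i + u) (j + v) * pyAt2 kernel (u + k) (v + k)) c) 0
        (PySem.List.pySetD st.1 i (PySem.List.pySetD (PySem.List.pyGetD st.1 i []) j convolution_sum),
         st.2 + convolution_sum)) st)
      (result_matrix, (0 : Int))
  st.2

-- ===== PORT B =====
def apply_convolution_alt (image : List (List Int)) (kernel : List (List Int)) (N : Int) (M : Int) : Int :=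
  let k : Int := 1
  if N < 3 ∨ M < 3 then 0 else
    (PySem.List.pyRange (-k) (k + 1) 1).foldl (fun total u =>
      (PySem.List.pyRange (-k) (k + 1) 1).foldl (fun total v =>
        let s :=
          (PySem.List.pyRange (k + u) (N - k + u) 1).foldl (fun s i =>
            let row := pyAt image i
            (PySem.List.pyRange (k + v) (M - k + v) 1).foldl (fun s j =>
              s + PySem.List.pyGetD row j 0) s) 0
        total + pyAt2 kernel (u + k) (v + k) * s) total) 0

-- ===== PRECONDITION & SPEC =====
-- Pre_ excludes exactly the inputs on which both Pythons raise IndexError: a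
-- nonempty 3x3 window (N ≥ 3 and M ≥ 3) whose accessed image rows/columns or
-- 3x3 kernel entries do not all exist.
def Pre_apply_convolution (image : List (List Int)) (kernel : List (List Int)) (N : Int) (M : Int) : Prop :=
  (3 ≤ N ∧ 3 ≤ M) →
    (N ≤ image.length ∧ (∀ row ∈ image.take N.toNat, M ≤ row.length) ∧
     3 ≤ kernel.length ∧ (∀ row ∈ kernel.take 3, (3 : Int) ≤ row.length))
instance (image : List (List Int)) (kernel : List (List Int)) (N : Int) (M : Int) : Decidable (Pre_apply_convolution image kernel N M) := by unfold Pre_apply_convolution; infer_instance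

def pvWitness_apply_convolution : List (List Int) × List (List Int) × Int × Int :=
  ([[1, 2, 3], [4, 5, 6], [7, 8, 9]], [[1, 0, 1], [0, 1, 0], [1, 0, 1]], 3, 3)

def Spec_apply_convolution (image : List (List Int)) (kernel : List (List Int)) (N : Int) (M : Int) (out : Int) : Prop := out = apply_convolution_alt image kernel N M
instance (image : List (List Int)) (kernel : List (List Int)) (N : Int) (M : Int) (out : Int) : Decidable (Spec_apply_convolution image kernel N M out) := by unfold Spec_apply_convolution; infer_instance

-- ===== CLAIM (what is proved, stated in full; the proofs are below) =====
def Claim_equal_apply_convolution : Prop := ∀ (image : List (List Int)) (kernel : List (List Int)) (N : Int) (M : Int), Dom_apply_convolution image kernel N M → Pre_apply_convolution image kernel N M → Spec_apply_convolution image kernel N M (apply_convolution image kernel N M)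

-- ===== LEMMAS AND PROOFS =====

-- Σ over a Python range (step 1): the common shape of both ports after the folds are split
def S (a b : Int) (f : Int → Int) : Int := ((PySem.List.pyRange a b 1).map f).sum

lemma S_intro (a b : Int) (f : Int → Int) :
    ((PySem.List.pyRange a b 1).map f).sum = S a b f := rfl

lemma pyAt2_intro (m : List (List Int)) (i j : Int) :
    PySem.List.pyGetD (pyAt m i) j 0 = pyAt2 m i j := rfl

lemma hk312 : PySem.Int.floordiv 3 2 = 1 := by decide

lemma range3' : PySem.List.pyRange (-1) (1 + 1) 1 = [-1, 0, 1] := by decide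

lemma S_congr (a b : Int) (f g : Int → Int) (h : ∀ x, f x = g x) : S a b f = S a b g :=
  congrArg List.sum (List.map_congr_left (fun x _ => h x))

lemma S_empty (a b : Int) (f : Int → Int) (h : b ≤ a) : S a b f = 0 := by
  simp [S, PySem.List.pyRange_one_eq_nil h]

lemma S_zero (a b : Int) : S a b (fun _ => 0) = 0 := by
  simp [S]

lemma S_add (a b : Int) (f g : Int → Int) :
    S a b (fun x => f x + g x) = S a b f + S a b g := by
  unfold S
  induction PySem.List.pyRange a b 1 with
  | nil => simp
  | cons h t ih => simp only [List.map_cons, List.sum_cons]; rw [ih]; ring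

lemma S_mul_right (a b c : Int) (f : Int → Int) :
    S a b (fun x => f x * c) = S a b f * c := by
  unfold S
  induction PySem.List.pyRange a b 1 with
  | nil => simp
  | cons h t ih => simp only [List.map_cons, List.sum_cons]; rw [ih]; ring

lemma S_shift (a b u : Int) (f : Int → Int) :
    S (a + u) (b + u) f = S a b (fun x => f (x + u)) := by
  simp only [S, PySem.List.pyRange_one]
  have hba : b + u - (a + u) = b - a := by ring
  rw [hba, List.map_map, List.map_map]
  refine congrArg List.sum (List.map_congr_left (fun x _ => ?_))
  simp only [Function.comp]
  congr 1
  ring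

lemma S_window_zero (N M : Int) (h : N < 3 ∨ M < 3) (g : Int → Int → Int) :
    S 1 (N - 1) (fun i => S 1 (M - 1) (g i)) = 0 := by
  rcases h with h | h
  · exact S_empty _ _ _ (by omega)
  · rw [S_congr 1 (N - 1) _ (fun _ => (0 : Int)) (fun i => S_empty 1 (M - 1) (g i) (by omega))]
    exact S_zero _ _

-- second component of a fold whose state also drags a matrix along
lemma snd_foldl_pair (lJ : List Int) (f : (List (List Int) × Int) → Int → List (List Int))
    (g : Int → Int) (st : List (List Int) × Int) :
    (lJ.foldl (fun st j => (f st j, st.2 + g j)) st).2 = st.2 + (lJ.map g).sum := by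
  induction lJ generalizing st with
  | nil => simp
  | cons b s ihJ => simp only [List.foldl_cons, List.map_cons, List.sum_cons, ihJ]; ring

-- second component of A's nested fold: the matrix component is dead weight
lemma snd_nested (lI lJ : List Int)
    (f : (List (List Int) × Int) → Int → Int → List (List Int)) (g : Int → Int → Int)
    (st : List (List Int) × Int) :
    (lI.foldl (fun st i => lJ.foldl (fun st j => (f st i j, st.2 + g i j)) st) st).2
      = st.2 + (lI.map (fun i => (lJ.map (g i)).sum)).sum := by
  induction lI generalizing st with
  | nil => simp
  | cons a t ih =>
      simp only [List.foldl_cons, List.map_cons, List.sum_cons, ih]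
      rw [snd_foldl_pair lJ (fun st j => f st a j) (g a)]
      ring

-- ===== VERDICT (by name: the statement is the Claim_ definition above) =====
theorem apply_convolution_spec : Claim_equal_apply_convolution := by
  intro image kernel N M _ _
  unfold Spec_apply_convolution
  simp only [apply_convolution, apply_convolution_alt, hk312]
  simp only [range3', List.foldl_cons, List.foldl_nil]
  rw [snd_nested]
  by_cases h : N < 3 ∨ M < 3
  · rw [if_pos h]
    simp only [S_intro]
    rw [S_window_zero N M h]
    ring
  · rw [if_neg h]
    simp only [PySem.List.foldl_add]
    simp only [S_intro, pyAt2_intro]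
    simp only [S_shift]
    simp only [S_add, S_mul_right]
    simp only [S_zero, zero_add, add_zero]
    ring
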